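-- pv_equiv track=rewrite | github.com/machayes00/Group1-Battleship | Ship_Mac.py | createbool
-- ===== SOURCE A (Python) =====
-- def createbool(array,startx,starty,orient,length):
--     check=True
--     start=0
--     if(startx < 0 or startx > 9):
--         raise Exception("X coordinate is not valid")
--     if(starty < 0 or starty > 9):
--         raise Exception("Y coordinate is not valid")
--     if(length < 1 or length > 10):
--         raise Exception("Length is not valid")
--     if(orient != 'L' and orient != 'R' and orient != 'U' and orient != 'D'):
--         raise Exception("Orientation is not valid")
--     if orient == 'L':
--         while start < length:
--             if array[starty][startx-start] != ' ':
--                 return(False)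
--             else:
--                 start=start+1
--     elif orient == 'R':
--         while start < length:
--             if array[starty][startx+start] != ' ':
--                 return(False)
--             else:
--                 start=start+1
--     elif orient == 'U':
--         while start < length:
--             if array[starty-start][startx] != ' ':
--                 return(False)
--             else:
--                 start=start+1
--     if orient == 'D':
--         while start < length:
--             if array[starty+start][startx] != ' ':
--                 return False
--             else:
--                 start=start+1
--     return True
-- ===== SOURCE B (Python) =====
-- def createbool(array, startx, starty, orient, length):
--     if startx < 0 or startx > 9:
--         raise Exception("X coordinate is not valid")
--     if starty < 0 or starty > 9:
--         raise Exception("Y coordinate is not valid")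
--     if length < 1 or length > 10:
--         raise Exception("Length is not valid")
--     if orient != 'L' and orient != 'R' and orient != 'U' and orient != 'D':
--         raise Exception("Orientation is not valid")
--     dx = (orient == 'R') - (orient == 'L')
--     dy = (orient == 'D') - (orient == 'U')
--
--     def free(x, y, n):
--         if n == 0:
--             return True
--         if array[y][x] != ' ':
--             return False
--         return free(x + dx, y + dy, n - 1)
--
--     return free(startx, starty, length)
-- ===== Notes on version B (the rewrite author's own statement) =====
-- stated objective: simpler
-- what changed: A's four duplicated while-loops (fixed origin plus a step counter, index recomputed each turn per orientation) are replaced by one recursive walker whose state is the moving cell itself, stepped by a direction vector computed arithmetically from the orientation; no counter, no per-orientation loop.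
import Mathlib
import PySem

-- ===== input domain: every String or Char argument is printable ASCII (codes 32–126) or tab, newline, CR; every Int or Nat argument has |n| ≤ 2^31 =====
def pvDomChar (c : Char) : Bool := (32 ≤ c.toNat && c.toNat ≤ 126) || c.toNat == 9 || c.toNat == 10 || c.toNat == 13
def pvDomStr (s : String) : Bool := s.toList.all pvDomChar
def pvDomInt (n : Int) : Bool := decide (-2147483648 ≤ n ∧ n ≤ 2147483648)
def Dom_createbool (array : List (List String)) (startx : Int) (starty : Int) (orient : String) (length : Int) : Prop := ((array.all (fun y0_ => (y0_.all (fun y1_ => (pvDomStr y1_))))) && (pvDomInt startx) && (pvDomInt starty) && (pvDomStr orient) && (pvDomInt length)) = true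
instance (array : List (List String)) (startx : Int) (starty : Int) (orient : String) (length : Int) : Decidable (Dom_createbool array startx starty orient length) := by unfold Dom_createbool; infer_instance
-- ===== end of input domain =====

-- B replaces A's four duplicated orientation while-loops (fixed origin + counter) by one
-- recursive walker whose state is the moving cell, stepped by an arithmetically computed
-- direction vector; objective: simpler (return values only; where A raises, Pre_ excludes).

-- ===== PORT A =====
-- shared cell access: array[Y][X] with Python index semantics (none = IndexError)
def pvCell (array : List (List String)) (y x : Int) : Option String :=
  (PySem.List.pyGet? array y).bind (fun row => PySem.List.pyGet? row x)

-- A's four while-loops, fuel = remaining iterations, `start` as in the Python.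
-- At an out-of-range access Python A raises IndexError; the port returns false there
-- (such inputs lie outside Pre_createbool).
def createbool_loopL (array : List (List String)) (startx starty : Int) : Nat → Int → Bool
  | 0, _ => true
  | n + 1, start =>
    match pvCell array starty (startx - start) with
    | none => false
    | some c => if c ≠ " " then false else createbool_loopL array startx starty n (start + 1)

def createbool_loopR (array : List (List String)) (startx starty : Int) : Nat → Int → Bool
  | 0, _ => true
  | n + 1, start =>
    match pvCell array starty (startx + start) with
    | none => false
    | some c => if c ≠ " " then false else createbool_loopR array startx starty n (start + 1)

def createbool_loopU (array : List (List String)) (startx starty : Int) : Nat → Int → Bool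
  | 0, _ => true
  | n + 1, start =>
    match pvCell array (starty - start) startx with
    | none => false
    | some c => if c ≠ " " then false else createbool_loopU array startx starty n (start + 1)

def createbool_loopD (array : List (List String)) (startx starty : Int) : Nat → Int → Bool
  | 0, _ => true
  | n + 1, start =>
    match pvCell array (starty + start) startx with
    | none => false
    | some c => if c ≠ " " then false else createbool_loopD array startx starty n (start + 1)

-- where the Python raises (the four validation checks), the port returns false;
-- Pre_createbool excludes those inputs
def createbool (array : List (List String)) (startx : Int) (starty : Int) (orient : String) (length : Int) : Bool :=
  if startx < 0 ∨ startx > 9 then false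
  else if starty < 0 ∨ starty > 9 then false
  else if length < 1 ∨ length > 10 then false
  else if orient ≠ "L" ∧ orient ≠ "R" ∧ orient ≠ "U" ∧ orient ≠ "D" then false
  else if orient = "L" then createbool_loopL array startx starty length.toNat 0
  else if orient = "R" then createbool_loopR array startx starty length.toNat 0
  else if orient = "U" then createbool_loopU array startx starty length.toNat 0
  else if orient = "D" then createbool_loopD array startx starty length.toNat 0
  else true

-- ===== PORT B =====
-- B's recursive walker `free(x, y, n)`: state is the moving cell, fuel n = remaining cells.
-- An out-of-range access (IndexError in Python) yields false; outside Pre_createbool.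
def createbool_free (array : List (List String)) (dx dy : Int) : Int → Int → Nat → Bool
  | _, _, 0 => true
  | x, y, n + 1 =>
    match (PySem.List.pyGet? array y).bind (fun row => PySem.List.pyGet? row x) with
    | none => false
    | some c => if c ≠ " " then false else createbool_free array dx dy (x + dx) (y + dy) n

-- validation failures (where the Python raises) return false, excluded by Pre_createbool
def createbool_alt (array : List (List String)) (startx : Int) (starty : Int) (orient : String) (length : Int) : Bool :=
  if startx < 0 ∨ startx > 9 then false
  else if starty < 0 ∨ starty > 9 then false
  else if length < 1 ∨ length > 10 then false
  else if orient ≠ "L" ∧ orient ≠ "R" ∧ orient ≠ "U" ∧ orient ≠ "D" then false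
  else
    let dx : Int := (if orient = "R" then 1 else 0) - (if orient = "L" then 1 else 0)
    let dy : Int := (if orient = "D" then 1 else 0) - (if orient = "U" then 1 else 0)
    createbool_free array dx dy startx starty length.toNat

-- ===== PRECONDITION & SPEC =====
-- direction vector (proof-side helper used only by Pre_)
def pvDir (orient : String) : Int × Int :=
  if orient = "L" then (-1, 0) else if orient = "R" then (1, 0)
  else if orient = "U" then (0, -1) else (0, 1)

-- Pre_ excludes exactly the inputs where A raises: invalid coordinates/length/orientation,
-- or a ray whose scan reaches an out-of-range cell (IndexError) before hitting a non-space
-- cell (a cell at step i need only exist when every earlier cell exists and is a space).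
def Pre_createbool (array : List (List String)) (startx : Int) (starty : Int) (orient : String) (length : Int) : Prop :=
  0 ≤ startx ∧ startx ≤ 9 ∧ 0 ≤ starty ∧ starty ≤ 9 ∧ 1 ≤ length ∧ length ≤ 10 ∧
  (orient = "L" ∨ orient = "R" ∨ orient = "U" ∨ orient = "D") ∧
  (∀ i ∈ List.range length.toNat,
    (∀ k ∈ List.range i,
      pvCell array (starty + (pvDir orient).2 * k) (startx + (pvDir orient).1 * k) = some " ") →
    (pvCell array (starty + (pvDir orient).2 * i) (startx + (pvDir orient).1 * i)).isSome)

instance (array : List (List String)) (startx : Int) (starty : Int) (orient : String) (length : Int) : Decidable (Pre_createbool array startx starty orient length) := by unfold Pre_createbool; infer_instance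

def pvWitness_createbool : List (List String) × Int × Int × String × Int :=
  ([[" ", " ", " "], [" ", "X", " "]], 0, 0, "R", 3)

def Spec_createbool (array : List (List String)) (startx : Int) (starty : Int) (orient : String) (length : Int) (out : Bool) : Prop := out = createbool_alt array startx starty orient length
instance (array : List (List String)) (startx : Int) (starty : Int) (orient : String) (length : Int) (out : Bool) : Decidable (Spec_createbool array startx starty orient length out) := by unfold Spec_createbool; infer_instance

-- ===== CLAIM (what is proved, stated in full; the proofs are below) =====
def Claim_equal_createbool : Prop := ∀ (array : List (List String)) (startx : Int) (starty : Int) (orient : String) (length : Int), Dom_createbool array startx starty orient length → Pre_createbool array startx starty orient length → Spec_createbool array startx starty orient length (createbool array startx starty orient length)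

-- ===== LEMMAS AND PROOFS =====

-- each of A's counter loops equals B's walker started at the counter's current cell
theorem pvLoopL_eq_free (array : List (List String)) (startx starty : Int) :
    ∀ (n : Nat) (s : Int), createbool_loopL array startx starty n s =
      createbool_free array (-1) 0 (startx - s) starty n := by
  intro n
  induction n with
  | zero => intro s; rfl
  | succ n ih =>
    intro s
    simp only [createbool_loopL, createbool_free, pvCell]
    cases h : (PySem.List.pyGet? array starty).bind (fun row => PySem.List.pyGet? row (startx - s)) with
    | none => rfl
    | some c =>
      by_cases hc : c = " "
      · have : startx - s + -1 = startx - (s + 1) := by ring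
        simp [hc, ih (s + 1), this]
      · simp [hc]

theorem pvLoopR_eq_free (array : List (List String)) (startx starty : Int) :
    ∀ (n : Nat) (s : Int), createbool_loopR array startx starty n s =
      createbool_free array 1 0 (startx + s) starty n := by
  intro n
  induction n with
  | zero => intro s; rfl
  | succ n ih =>
    intro s
    simp only [createbool_loopR, createbool_free, pvCell]
    cases h : (PySem.List.pyGet? array starty).bind (fun row => PySem.List.pyGet? row (startx + s)) with
    | none => rfl
    | some c =>
      by_cases hc : c = " "
      · have : startx + s + 1 = startx + (s + 1) := by ring
        simp [hc, ih (s + 1), this]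
      · simp [hc]

theorem pvLoopU_eq_free (array : List (List String)) (startx starty : Int) :
    ∀ (n : Nat) (s : Int), createbool_loopU array startx starty n s =
      createbool_free array 0 (-1) startx (starty - s) n := by
  intro n
  induction n with
  | zero => intro s; rfl
  | succ n ih =>
    intro s
    simp only [createbool_loopU, createbool_free, pvCell]
    cases h : (PySem.List.pyGet? array (starty - s)).bind (fun row => PySem.List.pyGet? row startx) with
    | none => rfl
    | some c =>
      by_cases hc : c = " "
      · have : starty - s + -1 = starty - (s + 1) := by ring
        simp [hc, ih (s + 1), this]
      · simp [hc]

theorem pvLoopD_eq_free (array : List (List String)) (startx starty : Int) :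
    ∀ (n : Nat) (s : Int), createbool_loopD array startx starty n s =
      createbool_free array 0 1 startx (starty + s) n := by
  intro n
  induction n with
  | zero => intro s; rfl
  | succ n ih =>
    intro s
    simp only [createbool_loopD, createbool_free, pvCell]
    cases h : (PySem.List.pyGet? array (starty + s)).bind (fun row => PySem.List.pyGet? row startx) with
    | none => rfl
    | some c =>
      by_cases hc : c = " "
      · have : starty + s + 1 = starty + (s + 1) := by ring
        simp [hc, ih (s + 1), this]
      · simp [hc]

-- the two ports agree on every input
theorem pvPorts_eq (array : List (List String)) (startx starty : Int) (orient : String) (length : Int) :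
    createbool array startx starty orient length = createbool_alt array startx starty orient length := by
  unfold createbool createbool_alt
  by_cases h1 : startx < 0 ∨ startx > 9
  · simp [h1]
  by_cases h2 : starty < 0 ∨ starty > 9
  · simp [h1, h2]
  by_cases h3 : length < 1 ∨ length > 10
  · simp [h1, h2, h3]
  by_cases h4 : orient ≠ "L" ∧ orient ≠ "R" ∧ orient ≠ "U" ∧ orient ≠ "D"
  · simp [h1, h2, h3, h4]
  simp only [h1, h2, h3, h4, if_false]
  by_cases hL : orient = "L"
  · subst hL
    have := pvLoopL_eq_free array startx starty length.toNat 0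
    simpa using this
  by_cases hR : orient = "R"
  · subst hR
    have := pvLoopR_eq_free array startx starty length.toNat 0
    simpa [hL] using this
  by_cases hU : orient = "U"
  · subst hU
    have := pvLoopU_eq_free array startx starty length.toNat 0
    simpa [hL, hR] using this
  have hD : orient = "D" := by
    by_contra hD
    exact h4 ⟨hL, hR, hU, hD⟩
  subst hD
  have := pvLoopD_eq_free array startx starty length.toNat 0
  simpa [hL, hR, hU] using this

-- ===== VERDICT (by name: the statement is the Claim_ definition above) =====
theorem createbool_spec : Claim_equal_createbool := by
  intro array startx starty orient length _ _
  unfold Spec_createbool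
  exact pvPorts_eq array startx starty orient length
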